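-- pv_equiv track=rewrite | github.com/damurdock/SIDR | sidr/common.py | taxidToLineage
-- ===== SOURCE A (Python) =====
-- def taxidToLineage(taxid, taxdump, classificationLevel):
--     """
--     Recursively converts an NCBI taxid to a full phylogenetic lineage.
--
--     Args:
--         taxid: The taxid to look up.
--         taxdump: The NCBI taxonomy dump as parsed by parseTaxDump
--         classificationLevel: The level of classification to save into the corpus.
--     Returns:
--         classification: A string containing the lineage at the chosen classification level.
--     """
--     taxid = taxid.split(";")[0]
--     tax = taxdump[taxid]
--     if "deleted" in tax: # taxid has been removed from NCBI db, indicates that taxdump and blastdb are out of sync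
--         raise Exception("ERROR: Taxon id %s has been deleted from the NCBI DB.\nPlease update your databases and re-run BLAST." % taxid)
--     if "merged" in tax:
--         merge = tax[1]
--         return taxidToLineage(merge, taxdump, classificationLevel)
--     try:
--         if tax[2].lower() == classificationLevel.lower(): # final answer
--             return tax[0]
--         elif taxid != '1': # recursive call
--             return taxidToLineage(tax[1], taxdump, classificationLevel)
--         elif taxid == '1': # nohit
--             return("nohit")
--         else: # edge case
--             raise Exception("Taxid %s has failed to resolve." % taxid)
--     except KeyError:
--         raise Exception("Taxon id %s was not found in the NCBI DB.\nPlease update your DB and try again." % taxid)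
-- ===== SOURCE B (Python) =====
-- def taxidToLineage(taxid, taxdump, classificationLevel):
--     """Iterative walk up the taxonomy: keeps the current taxid in a loop
--     instead of recursing; a walk longer than the dump means a cycle."""
--     target = classificationLevel.lower()
--     for _ in range(len(taxdump) + 1):
--         taxid = taxid.split(";")[0]
--         tax = taxdump[taxid]
--         if "deleted" in tax:
--             raise Exception("ERROR: Taxon id %s has been deleted from the NCBI DB.\nPlease update your databases and re-run BLAST." % taxid)
--         if "merged" in tax:
--             taxid = tax[1]
--             continue
--         if tax[2].lower() == target:
--             return tax[0]
--         if taxid == '1':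
--             return "nohit"
--         taxid = tax[1]
--     raise Exception("Taxid %s has failed to resolve." % taxid)
-- ===== Notes on version B (the rewrite author's own statement) =====
-- stated objective: alternative
-- what changed: A's unbounded recursion is replaced by an iterative bounded walk (a for-loop over at most len(taxdump)+1 steps, so a cyclic dump raises instead of overflowing the stack) that keeps the current taxid in a variable and lowers classificationLevel once before the loop.
import Mathlib
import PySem

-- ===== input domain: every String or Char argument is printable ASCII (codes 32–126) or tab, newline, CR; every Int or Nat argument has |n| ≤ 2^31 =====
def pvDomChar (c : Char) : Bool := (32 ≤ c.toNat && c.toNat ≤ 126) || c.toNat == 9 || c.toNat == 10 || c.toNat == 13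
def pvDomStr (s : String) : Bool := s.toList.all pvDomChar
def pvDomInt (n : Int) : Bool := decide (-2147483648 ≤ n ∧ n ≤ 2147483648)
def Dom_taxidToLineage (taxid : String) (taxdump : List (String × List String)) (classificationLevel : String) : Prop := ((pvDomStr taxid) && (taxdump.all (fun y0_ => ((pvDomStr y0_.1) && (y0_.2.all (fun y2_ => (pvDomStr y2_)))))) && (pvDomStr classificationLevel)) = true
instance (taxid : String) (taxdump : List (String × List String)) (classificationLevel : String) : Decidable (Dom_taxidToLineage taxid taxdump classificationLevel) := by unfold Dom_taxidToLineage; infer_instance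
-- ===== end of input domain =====

-- B replaces A's unbounded recursion by a bounded iterative walk (a chain longer than the dump
-- means a cycle) with the classification level lowered once up front; return values are identical
-- wherever A returns (both raise, with different exceptions, elsewhere).

-- ===== PORT A =====
-- Literal port of A's recursion, totalised with fuel: a terminating Python run looks up each dump
-- entry at most once (a repeated taxid loops forever), so taxdump.length + 1 calls always suffice;
-- every path on which the Python raises (KeyError — bare or converted to Exception by the caller's
-- `except` — the 'deleted' Exception, IndexError on a short entry) and fuel exhaustion (Python
-- recurses forever) return "" here and are excluded by Pre_taxidToLineage.
def pvLineageRec : Nat → String → List (String × List String) → String → String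
  | 0, _, _, _ => ""
  | Nat.succ fuel, taxid, taxdump, classificationLevel =>
    match PySem.Str.split? taxid ";" with
    | none => ""                                   -- unreachable: separator ";" is non-empty
    | some parts =>
      match PySem.List.pyGet? parts 0 with
      | none => ""                                 -- unreachable: split(...) is never empty
      | some taxid =>
        match PySem.Dict.get? (PySem.Dict.mk taxdump) taxid with
        | none => ""                               -- KeyError
        | some tax =>
          if tax.contains "deleted" then ""        -- raise Exception (deleted taxon)
          else if tax.contains "merged" then
            match PySem.List.pyGet? tax 1 with
            | none => ""                           -- IndexError
            | some merge => pvLineageRec fuel merge taxdump classificationLevel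
          else
            match PySem.List.pyGet? tax 2 with
            | none => ""                           -- IndexError on tax[2]
            | some rank =>
              if PySem.Str.lower rank == PySem.Str.lower classificationLevel then
                match PySem.List.pyGet? tax 0 with
                | none => ""                       -- unreachable: tax[2] exists
                | some name => name
              else if taxid ≠ "1" then
                match PySem.List.pyGet? tax 1 with
                | none => ""                       -- IndexError
                | some parent => pvLineageRec fuel parent taxdump classificationLevel
              else if taxid = "1" then "nohit"
              else ""                              -- A's unreachable final `raise`

def taxidToLineage (taxid : String) (taxdump : List (String × List String)) (classificationLevel : String) : String :=
  pvLineageRec (taxdump.length + 1) taxid taxdump classificationLevel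

-- ===== PORT B =====
-- Port of B's `for _ in range(len(taxdump) + 1)` loop: tail recursion on the remaining iteration
-- count; the dict lookup is the assoc-list first match; raising paths return "" as in port A.
def pvWalk : Nat → String → List (String × List String) → String → String
  | 0, _, _, _ => ""                               -- loop exhausted: B raises (cycle)
  | Nat.succ steps, taxid, taxdump, target =>
    let cur := ((PySem.Str.split? taxid ";").getD []).headD ""
    match (taxdump.find? (fun p => p.1 == cur)).map Prod.snd with
    | none => ""                                   -- KeyError
    | some tax =>
      if tax.contains "deleted" then ""            -- raise Exception (deleted taxon)
      else if tax.contains "merged" then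
        match tax with
        | _ :: merge :: _ => pvWalk steps merge taxdump target
        | _ => ""                                  -- IndexError
      else
        match tax with
        | name :: parent :: rank :: _ =>
          if PySem.Str.lower rank == target then name
          else if cur = "1" then "nohit"
          else pvWalk steps parent taxdump target
        | _ => ""                                  -- IndexError on tax[2]

def taxidToLineage_alt (taxid : String) (taxdump : List (String × List String)) (classificationLevel : String) : String :=
  pvWalk (taxdump.length + 1) taxid taxdump (PySem.Str.lower classificationLevel)

-- ===== PRECONDITION & SPEC =====
-- Exactly the inputs on which the Python A returns: the parent chain from taxid stays inside the
-- dump (visiting each entry at most once — a revisit makes Python recurse forever), meets no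
-- 'deleted' mark and no too-short entry, and ends in a rank match or at the root '1'; the visited
-- entry is removed at each step, which is what makes the condition terminate.
def pvChainOkAux : Nat → List (String × List String) → String → String → Bool
  | 0, _, _, _ => false          -- with the step below the dump is empty here, so no chain exists
  | Nat.succ n, dump, taxid, level =>
    let k := ((PySem.Str.split? taxid ";").getD []).headD ""
    match dump.find? (fun p => p.1 == k) with
    | none => false
    | some pr =>
      (!pr.2.contains "deleted") &&
      (if pr.2.contains "merged" then
        match pr.2 with
        | _ :: merge :: _ => pvChainOkAux n (dump.eraseP (fun p => p.1 == k)) merge level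
        | _ => false
      else
        match pr.2 with
        | _ :: parent :: rank :: _ =>
          (PySem.Str.lower rank == PySem.Str.lower level) || (k == "1") ||
            pvChainOkAux n (dump.eraseP (fun p => p.1 == k)) parent level
        | _ => false)

def pvChainOk (dump : List (String × List String)) (taxid level : String) : Bool :=
  pvChainOkAux dump.length dump taxid level

def Pre_taxidToLineage (taxid : String) (taxdump : List (String × List String)) (classificationLevel : String) : Prop :=
  pvChainOk taxdump taxid classificationLevel = true
instance (taxid : String) (taxdump : List (String × List String)) (classificationLevel : String) : Decidable (Pre_taxidToLineage taxid taxdump classificationLevel) := by unfold Pre_taxidToLineage; infer_instance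

def pvWitness_taxidToLineage : String × (List (String × List String)) × String :=
  ("9", [("1", ["root", "1", "no rank"]), ("9", ["Bacteria", "1", "superkingdom"])], "Superkingdom")

def Spec_taxidToLineage (taxid : String) (taxdump : List (String × List String)) (classificationLevel : String) (out : String) : Prop := out = taxidToLineage_alt taxid taxdump classificationLevel
instance (taxid : String) (taxdump : List (String × List String)) (classificationLevel : String) (out : String) : Decidable (Spec_taxidToLineage taxid taxdump classificationLevel out) := by unfold Spec_taxidToLineage; infer_instance

-- ===== CLAIM (what is proved, stated in full; the proofs are below) =====
def Claim_equal_taxidToLineage : Prop := ∀ (taxid : String) (taxdump : List (String × List String)) (classificationLevel : String), Dom_taxidToLineage taxid taxdump classificationLevel → Pre_taxidToLineage taxid taxdump classificationLevel → Spec_taxidToLineage taxid taxdump classificationLevel (taxidToLineage taxid taxdump classificationLevel)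

-- ===== LEMMAS AND PROOFS =====

theorem pvSplitOn_go_ne_nil (sep : List Char) : ∀ (fuel : Nat) (l cur : List Char) (acc : List (List Char)),
    PySem.Chars.splitOn.go sep fuel l cur acc ≠ [] := by
  intro fuel
  induction fuel with
  | zero => intro l cur acc; simp [PySem.Chars.splitOn.go]
  | succ n ih =>
    intro l cur acc
    cases l with
    | nil => simp [PySem.Chars.splitOn.go]
    | cons c rest =>
      rw [PySem.Chars.splitOn.go]
      split_ifs <;> apply ih

theorem pvSplit_semi (s : String) :
    ∃ p ps, PySem.Str.split? s ";" = some (p :: ps) := by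
  have h : PySem.Chars.splitOn s.toList [';'] ≠ [] := pvSplitOn_go_ne_nil [';'] _ s.toList [] []
  cases hc : PySem.Chars.splitOn s.toList [';'] with
  | nil => exact absurd hc h
  | cons a as =>
    refine ⟨String.ofList a, as.map String.ofList, ?_⟩
    simp [PySem.Str.split?, PySem.Chars.split?, hc]

theorem pvGet_eq_find (d : List (String × List String)) (k : String) :
    PySem.Dict.get? (PySem.Dict.mk d) k = (d.find? (fun p => p.1 == k)).map Prod.snd := by
  induction d with
  | nil => rfl
  | cons hd tl ih =>
    rw [List.find?]
    cases hd with
    | mk hk hv =>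
      rw [PySem.Dict.get?_mk_cons]
      by_cases h : hk = k
      · simp [h]
      · simp only [show (hk == k) = false by simp [h], Bool.false_eq_true, ih]
        simp

set_option maxHeartbeats 2000000 in
theorem pvRec_eq_pvWalk (taxdump : List (String × List String)) (classificationLevel : String) :
    ∀ (fuel : Nat) (taxid : String),
      pvLineageRec fuel taxid taxdump classificationLevel
        = pvWalk fuel taxid taxdump (PySem.Str.lower classificationLevel) := by
  intro fuel
  induction fuel with
  | zero => intro t; rfl
  | succ n ih =>
    intro t
    rw [pvLineageRec, pvWalk]
    obtain ⟨p0, ps, hsp⟩ := pvSplit_semi t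
    rw [hsp]
    simp only [Option.getD_some, List.headD_cons, PySem.List.pyGet?_zero,
      List.getElem?_cons_zero, pvGet_eq_find]
    cases hf : (List.find? (fun p => p.1 == p0) taxdump).map Prod.snd with
    | none => rfl
    | some tax =>
      by_cases hdel : "deleted" ∈ tax
      · simp [hdel]
      · by_cases hmer : "merged" ∈ tax
        · cases tax with
          | nil => simp at hmer
          | cons a rest =>
            cases rest with
            | nil =>
              have hg1 : PySem.List.pyGet? [a] 1 = none := by simp [pysem]
              simp [hdel, hmer, hg1]
            | cons b rest2 =>
              have hg1 : PySem.List.pyGet? (a :: b :: rest2) 1 = some b := by simp [pysem]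
              simp [hdel, hmer, ih]
        · cases tax with
          | nil =>
            have hg2 : PySem.List.pyGet? ([] : List String) 2 = none := by simp [pysem]
            simp [hdel, hmer, hg2]
          | cons a rest =>
            cases rest with
            | nil =>
              have hg2 : PySem.List.pyGet? [a] 2 = none := by simp [pysem]
              simp [hdel, hmer, hg2]
            | cons b rest2 =>
              cases rest2 with
              | nil =>
                have hg2 : PySem.List.pyGet? [a, b] 2 = none := by simp [pysem]
                simp [hdel, hmer, hg2]
              | cons c rest3 =>
                have hg0 : PySem.List.pyGet? (a :: b :: c :: rest3) 0 = some a := by simp [pysem]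
                have hg1 : PySem.List.pyGet? (a :: b :: c :: rest3) 1 = some b := by simp [pysem]
                have hg2 : PySem.List.pyGet? (a :: b :: c :: rest3) 2 = some c := by simp [pysem]
                by_cases hr : PySem.Str.lower c = PySem.Str.lower classificationLevel
                · simp [hdel, hmer, hg2, hr]
                · by_cases h1 : p0 = "1"
                  · simp [hdel, hmer, hg2, hr, h1]
                  · simp [hdel, hmer, hg1, hg2, hr, h1, ih]

-- ===== VERDICT (by name: the statement is the Claim_ definition above) =====
theorem taxidToLineage_spec : Claim_equal_taxidToLineage := by
  intro taxid taxdump classificationLevel _ _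
  unfold Spec_taxidToLineage taxidToLineage taxidToLineage_alt
  exact pvRec_eq_pvWalk taxdump classificationLevel _ taxid
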